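-- pv_equiv track=rewrite | github.com/GorgoGerbis/PartSelect-ChatBot-JW | backend/services/fast_lookup_service.py | _detect_appliance_type_from_model
-- ===== SOURCE A (Python) =====
-- from typing import Dict, Any, Optional, List
--
-- def _detect_appliance_type_from_model(model: str) -> Optional[str]:
--     """Detect appliance type from model number prefix"""
--     model_upper = model.upper()
--
--     # Common dishwasher prefixes
--     if any(model_upper.startswith(prefix) for prefix in ['WDT', 'GDT', 'DDT', 'PDT', 'KUDS', 'KDTE']):
--         return 'dishwasher'
--
--     # Common refrigerator prefixes
--     if any(model_upper.startswith(prefix) for prefix in ['WRS', 'WRF', 'GNE', 'GSS', 'RF', 'RS']):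
--         return 'refrigerator'
--
--     # Kenmore uses numbers - 106.xxxxx is usually refrigerator, 665.xxxxx is dishwasher
--     if model_upper.startswith('106.'):
--         return 'refrigerator'
--     if model_upper.startswith('665.'):
--         return 'dishwasher'
--
--     return None
-- ===== SOURCE B (Python) =====
-- # B: a character-at-a-time prefix automaton (trie encoded as flat DFA tables)
-- # instead of repeated startswith checks; the prefix set is prefix-free, so the
-- # first terminal state reached gives the same answer as A's first-match branches.
--
-- _PREFIXES = [
--     ('WDT', 'dishwasher'), ('GDT', 'dishwasher'), ('DDT', 'dishwasher'),
--     ('PDT', 'dishwasher'), ('KUDS', 'dishwasher'), ('KDTE', 'dishwasher'),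
--     ('WRS', 'refrigerator'), ('WRF', 'refrigerator'), ('GNE', 'refrigerator'),
--     ('GSS', 'refrigerator'), ('RF', 'refrigerator'), ('RS', 'refrigerator'),
--     ('106.', 'refrigerator'), ('665.', 'dishwasher'),
-- ]
--
--
-- def _build_trie(prefixes):
--     """Build DFA tables: edges[(state, ch)] -> state, terminal[state] -> type."""
--     edges = {}
--     terminal = {}
--     next_state = 1
--     for prefix, appliance_type in prefixes:
--         state = 0
--         for ch in prefix:
--             key = (state, ch)
--             if key not in edges:
--                 edges[key] = next_state
--                 next_state += 1
--             state = edges[key]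
--         terminal[state] = appliance_type
--     return edges, terminal
--
--
-- _EDGES, _TERMINAL = _build_trie(_PREFIXES)
--
--
-- def _detect_appliance_type_from_model(model: str):
--     state = 0
--     for ch in model.upper():
--         state = _EDGES.get((state, ch))
--         if state is None:
--             return None
--         t = _TERMINAL.get(state)
--         if t is not None:
--             return t
--     return None
-- ===== Notes on version B (the rewrite author's own statement) =====
-- stated objective: alternative
-- what changed: Replaces A's repeated startswith checks over grouped prefix lists with a character-at-a-time prefix automaton (a trie built once into flat DFA edge/terminal tables) walked over the model string; the prefix set is prefix-free, so the first terminal reached equals A's first matching branch.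
import Mathlib
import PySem

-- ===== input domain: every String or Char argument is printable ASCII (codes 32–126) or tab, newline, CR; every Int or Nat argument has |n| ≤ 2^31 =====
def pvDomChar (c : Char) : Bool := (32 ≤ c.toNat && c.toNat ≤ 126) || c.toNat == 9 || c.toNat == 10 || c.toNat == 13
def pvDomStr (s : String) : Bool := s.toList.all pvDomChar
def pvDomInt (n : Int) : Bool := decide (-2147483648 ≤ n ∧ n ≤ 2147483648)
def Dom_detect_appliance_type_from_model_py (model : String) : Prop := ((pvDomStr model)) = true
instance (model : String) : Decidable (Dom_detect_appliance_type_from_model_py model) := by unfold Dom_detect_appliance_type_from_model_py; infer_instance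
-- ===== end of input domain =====

set_option maxRecDepth 4096


-- B replaces A's grouped startswith branch chain with a character-at-a-time prefix
-- automaton (a trie built once into flat edge/terminal tables) walked over the model;
-- the prefix set is prefix-free, so the first terminal reached equals A's first match.

-- ===== PORT A =====
def detect_appliance_type_from_model_py (model : String) : Option String :=
  let model_upper := PySem.Str.upper model
  if (["WDT", "GDT", "DDT", "PDT", "KUDS", "KDTE"].any fun pfx => PySem.Str.startswith model_upper pfx) then
    some "dishwasher"
  else if (["WRS", "WRF", "GNE", "GSS", "RF", "RS"].any fun pfx => PySem.Str.startswith model_upper pfx) then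
    some "refrigerator"
  else if PySem.Str.startswith model_upper "106." then
    some "refrigerator"
  else if PySem.Str.startswith model_upper "665." then
    some "dishwasher"
  else
    none

-- ===== PORT B =====
def pvPrefixes : List (String × String) :=
  [("WDT", "dishwasher"), ("GDT", "dishwasher"), ("DDT", "dishwasher"),
   ("PDT", "dishwasher"), ("KUDS", "dishwasher"), ("KDTE", "dishwasher"),
   ("WRS", "refrigerator"), ("WRF", "refrigerator"), ("GNE", "refrigerator"),
   ("GSS", "refrigerator"), ("RF", "refrigerator"), ("RS", "refrigerator"),
   ("106.", "refrigerator"), ("665.", "dishwasher")]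

-- transliteration of Source B's _build_trie: edges[(state, ch)] -> state, terminal[state] -> type
def pvBuildTrie (prefixes : List (String × String)) :
    PySem.Dict (Int × Char) Int × PySem.Dict Int String :=
  let res := prefixes.foldl (fun acc p =>
      let edges := acc.1
      let terminal := acc.2.1
      let next := acc.2.2
      let inner := p.1.toList.foldl (fun st ch =>
          let state := st.1
          let edges := st.2.1
          let next := st.2.2
          if edges.contains (state, ch) then (edges.getD (state, ch) 0, edges, next)
          else (next, edges.insert (state, ch) next, next + 1)) (0, edges, next)
      (inner.2.1, terminal.insert inner.1 p.2, inner.2.2))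
    (PySem.Dict.empty, PySem.Dict.empty, 1)
  (res.1, res.2.1)

def pvTrie : PySem.Dict (Int × Char) Int × PySem.Dict Int String := pvBuildTrie pvPrefixes

-- the for-loop of Source B's _detect_appliance_type_from_model
def pvWalk (cs : List Char) (state : Int) : Option String :=
  match cs with
  | [] => none
  | ch :: rest =>
    match pvTrie.1.get? (state, ch) with
    | none => none
    | some state' =>
      match pvTrie.2.get? state' with
      | some t => some t
      | none => pvWalk rest state'

def detect_appliance_type_from_model_py_alt (model : String) : Option String :=
  pvWalk (PySem.Str.upper model).toList 0

-- ===== PRECONDITION & SPEC =====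
def Spec_detect_appliance_type_from_model_py (model : String) (out : Option String) : Prop := out = detect_appliance_type_from_model_py_alt model
instance (model : String) (out : Option String) : Decidable (Spec_detect_appliance_type_from_model_py model out) := by unfold Spec_detect_appliance_type_from_model_py; infer_instance

-- ===== CLAIM (what is proved, stated in full; the proofs are below) =====
def Claim_equal_detect_appliance_type_from_model_py : Prop := ∀ (model : String), Dom_detect_appliance_type_from_model_py model → Spec_detect_appliance_type_from_model_py model (detect_appliance_type_from_model_py model)


-- ===== LEMMAS AND PROOFS =====
-- the built trie as a literal (kernel-checked evaluation of Source B's build loop)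
def pvTrie_lit : PySem.Dict (Int × Char) Int × PySem.Dict Int String :=
  (PySem.Dict.mk
    [((0, 'W'), 1), ((1, 'D'), 2), ((2, 'T'), 3), ((0, 'G'), 4), ((4, 'D'), 5),
     ((5, 'T'), 6), ((0, 'D'), 7), ((7, 'D'), 8), ((8, 'T'), 9), ((0, 'P'), 10),
     ((10, 'D'), 11), ((11, 'T'), 12), ((0, 'K'), 13), ((13, 'U'), 14), ((14, 'D'), 15),
     ((15, 'S'), 16), ((13, 'D'), 17), ((17, 'T'), 18), ((18, 'E'), 19), ((1, 'R'), 20),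
     ((20, 'S'), 21), ((20, 'F'), 22), ((4, 'N'), 23), ((23, 'E'), 24), ((4, 'S'), 25),
     ((25, 'S'), 26), ((0, 'R'), 27), ((27, 'F'), 28), ((27, 'S'), 29), ((0, '1'), 30),
     ((30, '0'), 31), ((31, '6'), 32), ((32, '.'), 33), ((0, '6'), 34), ((34, '6'), 35),
     ((35, '5'), 36), ((36, '.'), 37)],
   PySem.Dict.mk
    [(3, "dishwasher"), (6, "dishwasher"), (9, "dishwasher"), (12, "dishwasher"),
     (16, "dishwasher"), (19, "dishwasher"), (21, "refrigerator"), (22, "refrigerator"),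
     (24, "refrigerator"), (26, "refrigerator"), (28, "refrigerator"), (29, "refrigerator"),
     (33, "refrigerator"), (37, "dishwasher")])

theorem pvTrie_eq : pvTrie = pvTrie_lit := by rfl

theorem pvGetNil {κ ν : Type} [BEq κ] (x : κ) :
    (PySem.Dict.mk ([] : List (κ × ν))).get? x = none := rfl

@[simp] theorem pvE0_0 : pvTrie.1.get? (0, 'W') = some 1 := by rw [pvTrie_eq]; rfl
@[simp] theorem pvE0_1 : pvTrie.1.get? (0, 'G') = some 4 := by rw [pvTrie_eq]; rfl
@[simp] theorem pvE0_2 : pvTrie.1.get? (0, 'D') = some 7 := by rw [pvTrie_eq]; rfl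
@[simp] theorem pvE0_3 : pvTrie.1.get? (0, 'P') = some 10 := by rw [pvTrie_eq]; rfl
@[simp] theorem pvE0_4 : pvTrie.1.get? (0, 'K') = some 13 := by rw [pvTrie_eq]; rfl
@[simp] theorem pvE0_5 : pvTrie.1.get? (0, 'R') = some 27 := by rw [pvTrie_eq]; rfl
@[simp] theorem pvE0_6 : pvTrie.1.get? (0, '1') = some 30 := by rw [pvTrie_eq]; rfl
@[simp] theorem pvE0_7 : pvTrie.1.get? (0, '6') = some 34 := by rw [pvTrie_eq]; rfl
@[simp] theorem pvE1_0 : pvTrie.1.get? (1, 'D') = some 2 := by rw [pvTrie_eq]; rfl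
@[simp] theorem pvE1_1 : pvTrie.1.get? (1, 'R') = some 20 := by rw [pvTrie_eq]; rfl
@[simp] theorem pvE2_0 : pvTrie.1.get? (2, 'T') = some 3 := by rw [pvTrie_eq]; rfl
@[simp] theorem pvE4_0 : pvTrie.1.get? (4, 'D') = some 5 := by rw [pvTrie_eq]; rfl
@[simp] theorem pvE4_1 : pvTrie.1.get? (4, 'N') = some 23 := by rw [pvTrie_eq]; rfl
@[simp] theorem pvE4_2 : pvTrie.1.get? (4, 'S') = some 25 := by rw [pvTrie_eq]; rfl
@[simp] theorem pvE5_0 : pvTrie.1.get? (5, 'T') = some 6 := by rw [pvTrie_eq]; rfl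
@[simp] theorem pvE7_0 : pvTrie.1.get? (7, 'D') = some 8 := by rw [pvTrie_eq]; rfl
@[simp] theorem pvE8_0 : pvTrie.1.get? (8, 'T') = some 9 := by rw [pvTrie_eq]; rfl
@[simp] theorem pvE10_0 : pvTrie.1.get? (10, 'D') = some 11 := by rw [pvTrie_eq]; rfl
@[simp] theorem pvE11_0 : pvTrie.1.get? (11, 'T') = some 12 := by rw [pvTrie_eq]; rfl
@[simp] theorem pvE13_0 : pvTrie.1.get? (13, 'U') = some 14 := by rw [pvTrie_eq]; rfl
@[simp] theorem pvE13_1 : pvTrie.1.get? (13, 'D') = some 17 := by rw [pvTrie_eq]; rfl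
@[simp] theorem pvE14_0 : pvTrie.1.get? (14, 'D') = some 15 := by rw [pvTrie_eq]; rfl
@[simp] theorem pvE15_0 : pvTrie.1.get? (15, 'S') = some 16 := by rw [pvTrie_eq]; rfl
@[simp] theorem pvE17_0 : pvTrie.1.get? (17, 'T') = some 18 := by rw [pvTrie_eq]; rfl
@[simp] theorem pvE18_0 : pvTrie.1.get? (18, 'E') = some 19 := by rw [pvTrie_eq]; rfl
@[simp] theorem pvE20_0 : pvTrie.1.get? (20, 'S') = some 21 := by rw [pvTrie_eq]; rfl
@[simp] theorem pvE20_1 : pvTrie.1.get? (20, 'F') = some 22 := by rw [pvTrie_eq]; rfl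
@[simp] theorem pvE23_0 : pvTrie.1.get? (23, 'E') = some 24 := by rw [pvTrie_eq]; rfl
@[simp] theorem pvE25_0 : pvTrie.1.get? (25, 'S') = some 26 := by rw [pvTrie_eq]; rfl
@[simp] theorem pvE27_0 : pvTrie.1.get? (27, 'F') = some 28 := by rw [pvTrie_eq]; rfl
@[simp] theorem pvE27_1 : pvTrie.1.get? (27, 'S') = some 29 := by rw [pvTrie_eq]; rfl
@[simp] theorem pvE30_0 : pvTrie.1.get? (30, '0') = some 31 := by rw [pvTrie_eq]; rfl
@[simp] theorem pvE31_0 : pvTrie.1.get? (31, '6') = some 32 := by rw [pvTrie_eq]; rfl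
@[simp] theorem pvE32_0 : pvTrie.1.get? (32, '.') = some 33 := by rw [pvTrie_eq]; rfl
@[simp] theorem pvE34_0 : pvTrie.1.get? (34, '6') = some 35 := by rw [pvTrie_eq]; rfl
@[simp] theorem pvE35_0 : pvTrie.1.get? (35, '5') = some 36 := by rw [pvTrie_eq]; rfl
@[simp] theorem pvE36_0 : pvTrie.1.get? (36, '.') = some 37 := by rw [pvTrie_eq]; rfl
@[simp] theorem pvT1 : pvTrie.2.get? 1 = none := by rw [pvTrie_eq]; rfl
@[simp] theorem pvT2 : pvTrie.2.get? 2 = none := by rw [pvTrie_eq]; rfl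
@[simp] theorem pvT3 : pvTrie.2.get? 3 = some "dishwasher" := by rw [pvTrie_eq]; rfl
@[simp] theorem pvT4 : pvTrie.2.get? 4 = none := by rw [pvTrie_eq]; rfl
@[simp] theorem pvT5 : pvTrie.2.get? 5 = none := by rw [pvTrie_eq]; rfl
@[simp] theorem pvT6 : pvTrie.2.get? 6 = some "dishwasher" := by rw [pvTrie_eq]; rfl
@[simp] theorem pvT7 : pvTrie.2.get? 7 = none := by rw [pvTrie_eq]; rfl
@[simp] theorem pvT8 : pvTrie.2.get? 8 = none := by rw [pvTrie_eq]; rfl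
@[simp] theorem pvT9 : pvTrie.2.get? 9 = some "dishwasher" := by rw [pvTrie_eq]; rfl
@[simp] theorem pvT10 : pvTrie.2.get? 10 = none := by rw [pvTrie_eq]; rfl
@[simp] theorem pvT11 : pvTrie.2.get? 11 = none := by rw [pvTrie_eq]; rfl
@[simp] theorem pvT12 : pvTrie.2.get? 12 = some "dishwasher" := by rw [pvTrie_eq]; rfl
@[simp] theorem pvT13 : pvTrie.2.get? 13 = none := by rw [pvTrie_eq]; rfl
@[simp] theorem pvT14 : pvTrie.2.get? 14 = none := by rw [pvTrie_eq]; rfl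
@[simp] theorem pvT15 : pvTrie.2.get? 15 = none := by rw [pvTrie_eq]; rfl
@[simp] theorem pvT16 : pvTrie.2.get? 16 = some "dishwasher" := by rw [pvTrie_eq]; rfl
@[simp] theorem pvT17 : pvTrie.2.get? 17 = none := by rw [pvTrie_eq]; rfl
@[simp] theorem pvT18 : pvTrie.2.get? 18 = none := by rw [pvTrie_eq]; rfl
@[simp] theorem pvT19 : pvTrie.2.get? 19 = some "dishwasher" := by rw [pvTrie_eq]; rfl
@[simp] theorem pvT20 : pvTrie.2.get? 20 = none := by rw [pvTrie_eq]; rfl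
@[simp] theorem pvT21 : pvTrie.2.get? 21 = some "refrigerator" := by rw [pvTrie_eq]; rfl
@[simp] theorem pvT22 : pvTrie.2.get? 22 = some "refrigerator" := by rw [pvTrie_eq]; rfl
@[simp] theorem pvT23 : pvTrie.2.get? 23 = none := by rw [pvTrie_eq]; rfl
@[simp] theorem pvT24 : pvTrie.2.get? 24 = some "refrigerator" := by rw [pvTrie_eq]; rfl
@[simp] theorem pvT25 : pvTrie.2.get? 25 = none := by rw [pvTrie_eq]; rfl
@[simp] theorem pvT26 : pvTrie.2.get? 26 = some "refrigerator" := by rw [pvTrie_eq]; rfl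
@[simp] theorem pvT27 : pvTrie.2.get? 27 = none := by rw [pvTrie_eq]; rfl
@[simp] theorem pvT28 : pvTrie.2.get? 28 = some "refrigerator" := by rw [pvTrie_eq]; rfl
@[simp] theorem pvT29 : pvTrie.2.get? 29 = some "refrigerator" := by rw [pvTrie_eq]; rfl
@[simp] theorem pvT30 : pvTrie.2.get? 30 = none := by rw [pvTrie_eq]; rfl
@[simp] theorem pvT31 : pvTrie.2.get? 31 = none := by rw [pvTrie_eq]; rfl
@[simp] theorem pvT32 : pvTrie.2.get? 32 = none := by rw [pvTrie_eq]; rfl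
@[simp] theorem pvT33 : pvTrie.2.get? 33 = some "refrigerator" := by rw [pvTrie_eq]; rfl
@[simp] theorem pvT34 : pvTrie.2.get? 34 = none := by rw [pvTrie_eq]; rfl
@[simp] theorem pvT35 : pvTrie.2.get? 35 = none := by rw [pvTrie_eq]; rfl
@[simp] theorem pvT36 : pvTrie.2.get? 36 = none := by rw [pvTrie_eq]; rfl
@[simp] theorem pvT37 : pvTrie.2.get? 37 = some "dishwasher" := by rw [pvTrie_eq]; rfl

theorem pvN0 (c : Char) (h0 : c ≠ 'W') (h1 : c ≠ 'G') (h2 : c ≠ 'D') (h3 : c ≠ 'P') (h4 : c ≠ 'K') (h5 : c ≠ 'R') (h6 : c ≠ '1') (h7 : c ≠ '6') : pvTrie.1.get? (0, c) = none := by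
  rw [pvTrie_eq]; simp [pvTrie_lit, PySem.Dict.get?_mk_cons, pvGetNil, Ne.symm h0, Ne.symm h1, Ne.symm h2, Ne.symm h3, Ne.symm h4, Ne.symm h5, Ne.symm h6, Ne.symm h7]
theorem pvN1 (c : Char) (h0 : c ≠ 'D') (h1 : c ≠ 'R') : pvTrie.1.get? (1, c) = none := by
  rw [pvTrie_eq]; simp [pvTrie_lit, PySem.Dict.get?_mk_cons, pvGetNil, Ne.symm h0, Ne.symm h1]
theorem pvN2 (c : Char) (h0 : c ≠ 'T') : pvTrie.1.get? (2, c) = none := by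
  rw [pvTrie_eq]; simp [pvTrie_lit, PySem.Dict.get?_mk_cons, pvGetNil, Ne.symm h0]
theorem pvN4 (c : Char) (h0 : c ≠ 'D') (h1 : c ≠ 'N') (h2 : c ≠ 'S') : pvTrie.1.get? (4, c) = none := by
  rw [pvTrie_eq]; simp [pvTrie_lit, PySem.Dict.get?_mk_cons, pvGetNil, Ne.symm h0, Ne.symm h1, Ne.symm h2]
theorem pvN5 (c : Char) (h0 : c ≠ 'T') : pvTrie.1.get? (5, c) = none := by
  rw [pvTrie_eq]; simp [pvTrie_lit, PySem.Dict.get?_mk_cons, pvGetNil, Ne.symm h0]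
theorem pvN7 (c : Char) (h0 : c ≠ 'D') : pvTrie.1.get? (7, c) = none := by
  rw [pvTrie_eq]; simp [pvTrie_lit, PySem.Dict.get?_mk_cons, pvGetNil, Ne.symm h0]
theorem pvN8 (c : Char) (h0 : c ≠ 'T') : pvTrie.1.get? (8, c) = none := by
  rw [pvTrie_eq]; simp [pvTrie_lit, PySem.Dict.get?_mk_cons, pvGetNil, Ne.symm h0]
theorem pvN10 (c : Char) (h0 : c ≠ 'D') : pvTrie.1.get? (10, c) = none := by
  rw [pvTrie_eq]; simp [pvTrie_lit, PySem.Dict.get?_mk_cons, pvGetNil, Ne.symm h0]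
theorem pvN11 (c : Char) (h0 : c ≠ 'T') : pvTrie.1.get? (11, c) = none := by
  rw [pvTrie_eq]; simp [pvTrie_lit, PySem.Dict.get?_mk_cons, pvGetNil, Ne.symm h0]
theorem pvN13 (c : Char) (h0 : c ≠ 'U') (h1 : c ≠ 'D') : pvTrie.1.get? (13, c) = none := by
  rw [pvTrie_eq]; simp [pvTrie_lit, PySem.Dict.get?_mk_cons, pvGetNil, Ne.symm h0, Ne.symm h1]
theorem pvN14 (c : Char) (h0 : c ≠ 'D') : pvTrie.1.get? (14, c) = none := by
  rw [pvTrie_eq]; simp [pvTrie_lit, PySem.Dict.get?_mk_cons, pvGetNil, Ne.symm h0]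
theorem pvN15 (c : Char) (h0 : c ≠ 'S') : pvTrie.1.get? (15, c) = none := by
  rw [pvTrie_eq]; simp [pvTrie_lit, PySem.Dict.get?_mk_cons, pvGetNil, Ne.symm h0]
theorem pvN17 (c : Char) (h0 : c ≠ 'T') : pvTrie.1.get? (17, c) = none := by
  rw [pvTrie_eq]; simp [pvTrie_lit, PySem.Dict.get?_mk_cons, pvGetNil, Ne.symm h0]
theorem pvN18 (c : Char) (h0 : c ≠ 'E') : pvTrie.1.get? (18, c) = none := by
  rw [pvTrie_eq]; simp [pvTrie_lit, PySem.Dict.get?_mk_cons, pvGetNil, Ne.symm h0]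
theorem pvN20 (c : Char) (h0 : c ≠ 'S') (h1 : c ≠ 'F') : pvTrie.1.get? (20, c) = none := by
  rw [pvTrie_eq]; simp [pvTrie_lit, PySem.Dict.get?_mk_cons, pvGetNil, Ne.symm h0, Ne.symm h1]
theorem pvN23 (c : Char) (h0 : c ≠ 'E') : pvTrie.1.get? (23, c) = none := by
  rw [pvTrie_eq]; simp [pvTrie_lit, PySem.Dict.get?_mk_cons, pvGetNil, Ne.symm h0]
theorem pvN25 (c : Char) (h0 : c ≠ 'S') : pvTrie.1.get? (25, c) = none := by
  rw [pvTrie_eq]; simp [pvTrie_lit, PySem.Dict.get?_mk_cons, pvGetNil, Ne.symm h0]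
theorem pvN27 (c : Char) (h0 : c ≠ 'F') (h1 : c ≠ 'S') : pvTrie.1.get? (27, c) = none := by
  rw [pvTrie_eq]; simp [pvTrie_lit, PySem.Dict.get?_mk_cons, pvGetNil, Ne.symm h0, Ne.symm h1]
theorem pvN30 (c : Char) (h0 : c ≠ '0') : pvTrie.1.get? (30, c) = none := by
  rw [pvTrie_eq]; simp [pvTrie_lit, PySem.Dict.get?_mk_cons, pvGetNil, Ne.symm h0]
theorem pvN31 (c : Char) (h0 : c ≠ '6') : pvTrie.1.get? (31, c) = none := by
  rw [pvTrie_eq]; simp [pvTrie_lit, PySem.Dict.get?_mk_cons, pvGetNil, Ne.symm h0]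
theorem pvN32 (c : Char) (h0 : c ≠ '.') : pvTrie.1.get? (32, c) = none := by
  rw [pvTrie_eq]; simp [pvTrie_lit, PySem.Dict.get?_mk_cons, pvGetNil, Ne.symm h0]
theorem pvN34 (c : Char) (h0 : c ≠ '6') : pvTrie.1.get? (34, c) = none := by
  rw [pvTrie_eq]; simp [pvTrie_lit, PySem.Dict.get?_mk_cons, pvGetNil, Ne.symm h0]
theorem pvN35 (c : Char) (h0 : c ≠ '5') : pvTrie.1.get? (35, c) = none := by
  rw [pvTrie_eq]; simp [pvTrie_lit, PySem.Dict.get?_mk_cons, pvGetNil, Ne.symm h0]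
theorem pvN36 (c : Char) (h0 : c ≠ '.') : pvTrie.1.get? (36, c) = none := by
  rw [pvTrie_eq]; simp [pvTrie_lit, PySem.Dict.get?_mk_cons, pvGetNil, Ne.symm h0]

theorem pvWalk_eq_branches : ∀ (cs : List Char),
    pvWalk cs 0 =
      (if (["WDT", "GDT", "DDT", "PDT", "KUDS", "KDTE"].any fun pfx => PySem.Chars.startswith cs pfx.toList) then
        some "dishwasher"
      else if (["WRS", "WRF", "GNE", "GSS", "RF", "RS"].any fun pfx => PySem.Chars.startswith cs pfx.toList) then
        some "refrigerator"
      else if PySem.Chars.startswith cs "106.".toList then some "refrigerator"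
      else if PySem.Chars.startswith cs "665.".toList then some "dishwasher"
      else none) := by
  intro cs
  rcases cs with _ | ⟨c0, cs⟩
  · simp [pvWalk, PySem.Chars.startswith, List.isPrefixOf]
  · by_cases h0_0 : c0 = 'W'
    · subst h0_0
      rcases cs with _ | ⟨c1, cs⟩
      · simp [pvWalk, PySem.Chars.startswith, List.isPrefixOf]
      · by_cases h1_0 : c1 = 'D'
        · subst h1_0
          rcases cs with _ | ⟨c2, cs⟩
          · simp [pvWalk, PySem.Chars.startswith, List.isPrefixOf]
          · by_cases h2_0 : c2 = 'T'
            · subst h2_0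
              simp [pvWalk, PySem.Chars.startswith, List.isPrefixOf]
            · simp [pvWalk, PySem.Chars.startswith, List.isPrefixOf, pvN2 c2 h2_0, Ne.symm h2_0]
        · by_cases h1_1 : c1 = 'R'
          · subst h1_1
            rcases cs with _ | ⟨c2, cs⟩
            · simp [pvWalk, PySem.Chars.startswith, List.isPrefixOf]
            · by_cases h2_0 : c2 = 'S'
              · subst h2_0
                simp [pvWalk, PySem.Chars.startswith, List.isPrefixOf]
              · by_cases h2_1 : c2 = 'F'
                · subst h2_1
                  simp [pvWalk, PySem.Chars.startswith, List.isPrefixOf]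
                · simp [pvWalk, PySem.Chars.startswith, List.isPrefixOf, pvN20 c2 h2_0 h2_1, Ne.symm h2_0, Ne.symm h2_1]
          · simp [pvWalk, PySem.Chars.startswith, List.isPrefixOf, pvN1 c1 h1_0 h1_1, Ne.symm h1_0, Ne.symm h1_1]
    · by_cases h0_1 : c0 = 'G'
      · subst h0_1
        rcases cs with _ | ⟨c1, cs⟩
        · simp [pvWalk, PySem.Chars.startswith, List.isPrefixOf]
        · by_cases h1_0 : c1 = 'D'
          · subst h1_0
            rcases cs with _ | ⟨c2, cs⟩
            · simp [pvWalk, PySem.Chars.startswith, List.isPrefixOf]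
            · by_cases h2_0 : c2 = 'T'
              · subst h2_0
                simp [pvWalk, PySem.Chars.startswith, List.isPrefixOf]
              · simp [pvWalk, PySem.Chars.startswith, List.isPrefixOf, pvN5 c2 h2_0, Ne.symm h2_0]
          · by_cases h1_1 : c1 = 'N'
            · subst h1_1
              rcases cs with _ | ⟨c2, cs⟩
              · simp [pvWalk, PySem.Chars.startswith, List.isPrefixOf]
              · by_cases h2_0 : c2 = 'E'
                · subst h2_0
                  simp [pvWalk, PySem.Chars.startswith, List.isPrefixOf]
                · simp [pvWalk, PySem.Chars.startswith, List.isPrefixOf, pvN23 c2 h2_0, Ne.symm h2_0]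
            · by_cases h1_2 : c1 = 'S'
              · subst h1_2
                rcases cs with _ | ⟨c2, cs⟩
                · simp [pvWalk, PySem.Chars.startswith, List.isPrefixOf]
                · by_cases h2_0 : c2 = 'S'
                  · subst h2_0
                    simp [pvWalk, PySem.Chars.startswith, List.isPrefixOf]
                  · simp [pvWalk, PySem.Chars.startswith, List.isPrefixOf, pvN25 c2 h2_0, Ne.symm h2_0]
              · simp [pvWalk, PySem.Chars.startswith, List.isPrefixOf, pvN4 c1 h1_0 h1_1 h1_2, Ne.symm h1_0, Ne.symm h1_1, Ne.symm h1_2]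
      · by_cases h0_2 : c0 = 'D'
        · subst h0_2
          rcases cs with _ | ⟨c1, cs⟩
          · simp [pvWalk, PySem.Chars.startswith, List.isPrefixOf]
          · by_cases h1_0 : c1 = 'D'
            · subst h1_0
              rcases cs with _ | ⟨c2, cs⟩
              · simp [pvWalk, PySem.Chars.startswith, List.isPrefixOf]
              · by_cases h2_0 : c2 = 'T'
                · subst h2_0
                  simp [pvWalk, PySem.Chars.startswith, List.isPrefixOf]
                · simp [pvWalk, PySem.Chars.startswith, List.isPrefixOf, pvN8 c2 h2_0, Ne.symm h2_0]
            · simp [pvWalk, PySem.Chars.startswith, List.isPrefixOf, pvN7 c1 h1_0, Ne.symm h1_0]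
        · by_cases h0_3 : c0 = 'P'
          · subst h0_3
            rcases cs with _ | ⟨c1, cs⟩
            · simp [pvWalk, PySem.Chars.startswith, List.isPrefixOf]
            · by_cases h1_0 : c1 = 'D'
              · subst h1_0
                rcases cs with _ | ⟨c2, cs⟩
                · simp [pvWalk, PySem.Chars.startswith, List.isPrefixOf]
                · by_cases h2_0 : c2 = 'T'
                  · subst h2_0
                    simp [pvWalk, PySem.Chars.startswith, List.isPrefixOf]
                  · simp [pvWalk, PySem.Chars.startswith, List.isPrefixOf, pvN11 c2 h2_0, Ne.symm h2_0]
              · simp [pvWalk, PySem.Chars.startswith, List.isPrefixOf, pvN10 c1 h1_0, Ne.symm h1_0]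
          · by_cases h0_4 : c0 = 'K'
            · subst h0_4
              rcases cs with _ | ⟨c1, cs⟩
              · simp [pvWalk, PySem.Chars.startswith, List.isPrefixOf]
              · by_cases h1_0 : c1 = 'U'
                · subst h1_0
                  rcases cs with _ | ⟨c2, cs⟩
                  · simp [pvWalk, PySem.Chars.startswith, List.isPrefixOf]
                  · by_cases h2_0 : c2 = 'D'
                    · subst h2_0
                      rcases cs with _ | ⟨c3, cs⟩
                      · simp [pvWalk, PySem.Chars.startswith, List.isPrefixOf]
                      · by_cases h3_0 : c3 = 'S'
                        · subst h3_0
                          simp [pvWalk, PySem.Chars.startswith, List.isPrefixOf]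
                        · simp [pvWalk, PySem.Chars.startswith, List.isPrefixOf, pvN15 c3 h3_0, Ne.symm h3_0]
                    · simp [pvWalk, PySem.Chars.startswith, List.isPrefixOf, pvN14 c2 h2_0, Ne.symm h2_0]
                · by_cases h1_1 : c1 = 'D'
                  · subst h1_1
                    rcases cs with _ | ⟨c2, cs⟩
                    · simp [pvWalk, PySem.Chars.startswith, List.isPrefixOf]
                    · by_cases h2_0 : c2 = 'T'
                      · subst h2_0
                        rcases cs with _ | ⟨c3, cs⟩
                        · simp [pvWalk, PySem.Chars.startswith, List.isPrefixOf]
                        · by_cases h3_0 : c3 = 'E'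
                          · subst h3_0
                            simp [pvWalk, PySem.Chars.startswith, List.isPrefixOf]
                          · simp [pvWalk, PySem.Chars.startswith, List.isPrefixOf, pvN18 c3 h3_0, Ne.symm h3_0]
                      · simp [pvWalk, PySem.Chars.startswith, List.isPrefixOf, pvN17 c2 h2_0, Ne.symm h2_0]
                  · simp [pvWalk, PySem.Chars.startswith, List.isPrefixOf, pvN13 c1 h1_0 h1_1, Ne.symm h1_0, Ne.symm h1_1]
            · by_cases h0_5 : c0 = 'R'
              · subst h0_5
                rcases cs with _ | ⟨c1, cs⟩
                · simp [pvWalk, PySem.Chars.startswith, List.isPrefixOf]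
                · by_cases h1_0 : c1 = 'F'
                  · subst h1_0
                    simp [pvWalk, PySem.Chars.startswith, List.isPrefixOf]
                  · by_cases h1_1 : c1 = 'S'
                    · subst h1_1
                      simp [pvWalk, PySem.Chars.startswith, List.isPrefixOf]
                    · simp [pvWalk, PySem.Chars.startswith, List.isPrefixOf, pvN27 c1 h1_0 h1_1, Ne.symm h1_0, Ne.symm h1_1]
              · by_cases h0_6 : c0 = '1'
                · subst h0_6
                  rcases cs with _ | ⟨c1, cs⟩
                  · simp [pvWalk, PySem.Chars.startswith, List.isPrefixOf]
                  · by_cases h1_0 : c1 = '0'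
                    · subst h1_0
                      rcases cs with _ | ⟨c2, cs⟩
                      · simp [pvWalk, PySem.Chars.startswith, List.isPrefixOf]
                      · by_cases h2_0 : c2 = '6'
                        · subst h2_0
                          rcases cs with _ | ⟨c3, cs⟩
                          · simp [pvWalk, PySem.Chars.startswith, List.isPrefixOf]
                          · by_cases h3_0 : c3 = '.'
                            · subst h3_0
                              simp [pvWalk, PySem.Chars.startswith, List.isPrefixOf]
                            · simp [pvWalk, PySem.Chars.startswith, List.isPrefixOf, pvN32 c3 h3_0, Ne.symm h3_0]
                        · simp [pvWalk, PySem.Chars.startswith, List.isPrefixOf, pvN31 c2 h2_0, Ne.symm h2_0]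
                    · simp [pvWalk, PySem.Chars.startswith, List.isPrefixOf, pvN30 c1 h1_0, Ne.symm h1_0]
                · by_cases h0_7 : c0 = '6'
                  · subst h0_7
                    rcases cs with _ | ⟨c1, cs⟩
                    · simp [pvWalk, PySem.Chars.startswith, List.isPrefixOf]
                    · by_cases h1_0 : c1 = '6'
                      · subst h1_0
                        rcases cs with _ | ⟨c2, cs⟩
                        · simp [pvWalk, PySem.Chars.startswith, List.isPrefixOf]
                        · by_cases h2_0 : c2 = '5'
                          · subst h2_0
                            rcases cs with _ | ⟨c3, cs⟩
                            · simp [pvWalk, PySem.Chars.startswith, List.isPrefixOf]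
                            · by_cases h3_0 : c3 = '.'
                              · subst h3_0
                                simp [pvWalk, PySem.Chars.startswith, List.isPrefixOf]
                              · simp [pvWalk, PySem.Chars.startswith, List.isPrefixOf, pvN36 c3 h3_0, Ne.symm h3_0]
                          · simp [pvWalk, PySem.Chars.startswith, List.isPrefixOf, pvN35 c2 h2_0, Ne.symm h2_0]
                      · simp [pvWalk, PySem.Chars.startswith, List.isPrefixOf, pvN34 c1 h1_0, Ne.symm h1_0]
                  · simp [pvWalk, PySem.Chars.startswith, List.isPrefixOf, pvN0 c0 h0_0 h0_1 h0_2 h0_3 h0_4 h0_5 h0_6 h0_7, Ne.symm h0_0, Ne.symm h0_1, Ne.symm h0_2, Ne.symm h0_3, Ne.symm h0_4, Ne.symm h0_5, Ne.symm h0_6, Ne.symm h0_7]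

-- ===== VERDICT (by name: the statement is the Claim_ definition above) =====
theorem detect_appliance_type_from_model_py_spec : Claim_equal_detect_appliance_type_from_model_py := by
  intro model _
  unfold Spec_detect_appliance_type_from_model_py detect_appliance_type_from_model_py
    detect_appliance_type_from_model_py_alt
  rw [pvWalk_eq_branches]
  simp [PySem.Str.startswith_eq]
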